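-- pv_equiv track=rewrite | github.com/arnaudfrn/TF_IDF_Spark_MR | RDD_join_stopwords_False.py | lower_clean_str
-- ===== SOURCE A (Python) =====
-- def lower_clean_str(x):
--   punc='!"#$%&\'()*+,-./:;<=>?@[\\]^_`{|}~'
--   digit='0123456789'
--   lowercased_str = x.lower()
--
--   for ch in punc:
--     lowercased_str = lowercased_str.replace(ch, '')
--   for dig in digit:
--     lowercased_str = lowercased_str.replace(dig, '')
--   return lowercased_str.replace('\n', '')
-- ===== SOURCE B (Python) =====
-- def lower_clean_str(x):
--     bad = set('!"#$%&\'()*+,-./:;<=>?@[\\]^_`{|}~' + '0123456789' + '\n')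
--     return ''.join(c for c in x.lower() if c not in bad)
-- ===== Notes on version B (the rewrite author's own statement) =====
-- stated objective: simpler
-- what changed: B builds one removal set from the punctuation, digit and newline characters and filters the lowercased string in a single pass, instead of A's ~43 successive full-string replace scans.
import Mathlib
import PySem

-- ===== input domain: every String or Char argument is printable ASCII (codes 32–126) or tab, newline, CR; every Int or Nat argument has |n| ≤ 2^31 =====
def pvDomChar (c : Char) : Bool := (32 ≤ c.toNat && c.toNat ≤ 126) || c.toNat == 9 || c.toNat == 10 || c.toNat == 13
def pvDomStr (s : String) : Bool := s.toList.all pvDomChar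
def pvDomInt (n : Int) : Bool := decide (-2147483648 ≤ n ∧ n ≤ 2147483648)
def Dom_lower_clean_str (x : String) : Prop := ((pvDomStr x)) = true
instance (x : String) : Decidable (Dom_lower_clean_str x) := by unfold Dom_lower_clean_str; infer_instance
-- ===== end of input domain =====

-- B replaces A's ~43 successive single-character replace scans by one filtering pass
-- over the lowercased string using a removal set built once (objective: simpler).


-- ===== PORT A =====
def lower_clean_str (x : String) : String :=
  let punc : String := "!\"#$%&'()*+,-./:;<=>?@[\\]^_`{|}~"
  let digit : String := "0123456789"
  let lowercased_str := PySem.Str.lower x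
  let lowercased_str := punc.toList.foldl
    (fun s ch => PySem.Str.replace s (String.ofList [ch]) "") lowercased_str
  let lowercased_str := digit.toList.foldl
    (fun s dig => PySem.Str.replace s (String.ofList [dig]) "") lowercased_str
  PySem.Str.replace lowercased_str "\n" ""

-- ===== PORT B =====
def lower_clean_str_alt (x : String) : String :=
  let bad : PySem.Set Char :=
    PySem.Set.ofList ("!\"#$%&'()*+,-./:;<=>?@[\\]^_`{|}~" ++ "0123456789" ++ "\n").toList
  String.ofList ((PySem.Str.lower x).toList.filter (fun c => !(PySem.Set.contains bad c)))

-- ===== PRECONDITION & SPEC =====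
def Spec_lower_clean_str (x : String) (out : String) : Prop := out = lower_clean_str_alt x
instance (x : String) (out : String) : Decidable (Spec_lower_clean_str x out) := by unfold Spec_lower_clean_str; infer_instance

-- ===== CLAIM (what is proved, stated in full; the proofs are below) =====
def Claim_equal_lower_clean_str : Prop := ∀ (x : String), Dom_lower_clean_str x → Spec_lower_clean_str x (lower_clean_str x)

-- ===== LEMMAS AND PROOFS =====

-- replace.go for a single-character pattern with empty replacement is a filter
theorem replace_go_single (c : Char) :
    ∀ (l : List Char) (fuel : Nat) (acc : List Char), l.length ≤ fuel →
      PySem.Chars.replace.go [c] [] fuel l acc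
        = acc.reverse ++ l.filter (fun a => a != c) := by
  intro l
  induction l with
  | nil =>
      intro fuel acc _
      cases fuel <;> simp [PySem.Chars.replace.go]
  | cons h t ih =>
      intro fuel acc hle
      cases fuel with
      | zero => simp at hle
      | succ n =>
          by_cases hc : h = c
          · subst hc
            have hpre : ([h].isPrefixOf (h :: t)) = true := by
              simp [List.isPrefixOf]
            have hih := ih n acc (Nat.le_of_succ_le_succ (by simpa using hle))
            simp [PySem.Chars.replace.go, hpre, hih]
          · have hpre : ([c].isPrefixOf (h :: t)) = false := by
              rw [Bool.eq_false_iff]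
              intro h'
              simp [List.isPrefixOf] at h'
              exact hc h'.symm
            have hih := ih n (h :: acc) (Nat.le_of_succ_le_succ (by simpa using hle))
            simp [PySem.Chars.replace.go, hpre, hih, hc]

theorem replace_single (c : Char) (l : List Char) :
    PySem.Chars.replace l [c] [] = l.filter (fun a => a != c) := by
  simp [PySem.Chars.replace, replace_go_single c l l.length [] (le_refl _)]

theorem str_replace_single (c : Char) (s : String) :
    (PySem.Str.replace s (String.ofList [c]) "").toList
      = s.toList.filter (fun a => a != c) := by
  simp [PySem.Str.replace, replace_single]

theorem str_replace_nl (s : String) :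
    (PySem.Str.replace s "\n" "").toList = s.toList.filter (fun a => a != '\n') := by
  rw [show ("\n" : String) = String.ofList ['\n'] from rfl, str_replace_single]

-- a loop of single-character removals is one filter on non-membership
theorem str_foldl_replace (cs : List Char) (s : String) :
    (cs.foldl (fun s ch => PySem.Str.replace s (String.ofList [ch]) "") s).toList
      = s.toList.filter (fun a => !(cs.contains a)) := by
  induction cs generalizing s with
  | nil => simp
  | cons c cs ih =>
      rw [List.foldl_cons, ih, str_replace_single, List.filter_filter]
      apply List.filter_congr
      intro a _
      by_cases h1 : a ∈ cs <;> by_cases h2 : a = c <;> simp [h1, h2]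

theorem set_contains_ofList (l : List Char) (x : Char) :
    PySem.Set.contains (PySem.Set.ofList l) x = l.contains x := by
  by_cases hm : x ∈ l
  · have h1 : PySem.Set.contains (PySem.Set.ofList l) x = true :=
      (PySem.Set.contains_iff _ _).mpr ((PySem.Set.mem_ofList _ _).mpr hm)
    rw [h1]
    simp [hm]
  · have h1 : PySem.Set.contains (PySem.Set.ofList l) x = false := by
      rw [Bool.eq_false_iff]
      intro h
      exact hm ((PySem.Set.mem_ofList _ _).mp ((PySem.Set.contains_iff _ _).mp h))
    rw [h1]
    simp [hm]

theorem bigsplit : ("!\"#$%&'()*+,-./:;<=>?@[\\]^_`{|}~" ++ "0123456789" ++ "\n" : String).toList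
        = ("!\"#$%&'()*+,-./:;<=>?@[\\]^_`{|}~" : String).toList
          ++ ("0123456789" : String).toList ++ ['\n'] := rfl

theorem pred_eq (a : Char) :
    (a != '\n' && !"0123456789".toList.contains a &&
       !"!\"#$%&'()*+,-./:;<=>?@[\\]^_`{|}~".toList.contains a)
      = !(PySem.Set.ofList ("!\"#$%&'()*+,-./:;<=>?@[\\]^_`{|}~" ++ "0123456789" ++ "\n" : String).toList).contains a := by
  rw [set_contains_ofList, bigsplit, Bool.eq_iff_iff]
  simp [List.contains_eq_mem, bne]
  tauto

-- ===== VERDICT (by name: the statement is the Claim_ definition above) =====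
set_option maxHeartbeats 1000000 in
theorem lower_clean_str_spec : Claim_equal_lower_clean_str := by
  intro x _
  unfold Spec_lower_clean_str lower_clean_str lower_clean_str_alt
  apply String.toList_injective
  rw [str_replace_nl, str_foldl_replace, str_foldl_replace,
      List.filter_filter, List.filter_filter]
  dsimp only
  rw [@String.toList_ofList (List.filter (fun c =>
        !(PySem.Set.ofList ("!\"#$%&'()*+,-./:;<=>?@[\\]^_`{|}~" ++ "0123456789" ++ "\n").toList).contains c)
      (PySem.Str.lower x).toList)]
  exact List.filter_congr (fun a _ => pred_eq a)
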